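-- pv_equiv track=rewrite | github.com/EduardoSantos7/Algorithms4fun | Leetcode/3450. Maximum Students on a Single Bench/solution.py | maxStudentsOnBench
-- ===== SOURCE A (Python) =====
-- from typing import List
--
-- def maxStudentsOnBench(students: List[List[int]]) -> int:
--     benches = dict()
--     for (student, bench) in students:
--         if bench in benches:
--             benches[bench].add(student)
--         else:
--             benches[bench] = set([student])
--     ans = 0
--     for students in benches.values():
--         ans = max(ans, len(students))
--
--     return ans
-- ===== SOURCE B (Python) =====
-- from typing import List
--
-- def maxStudentsOnBench(students: List[List[int]]) -> int:
--     pairs = sorted((b, s) for s, b in students)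
--     best = 0
--     run = 0
--     prev = None
--     for p in pairs:
--         if p == prev:
--             continue
--         if prev is not None and p[0] == prev[0]:
--             run += 1
--         else:
--             run = 1
--         if run > best:
--             best = run
--         prev = p
--     return best
-- ===== Notes on version B (the rewrite author's own statement) =====
-- stated objective: alternative
-- what changed: Instead of partitioning rows into a dict of per-bench student sets and scanning their sizes, B sorts the (bench, student) pairs once and makes a single run-length scan over the sorted list, skipping adjacent duplicate pairs and returning the longest bench run; no dict or set is used.
import Mathlib
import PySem

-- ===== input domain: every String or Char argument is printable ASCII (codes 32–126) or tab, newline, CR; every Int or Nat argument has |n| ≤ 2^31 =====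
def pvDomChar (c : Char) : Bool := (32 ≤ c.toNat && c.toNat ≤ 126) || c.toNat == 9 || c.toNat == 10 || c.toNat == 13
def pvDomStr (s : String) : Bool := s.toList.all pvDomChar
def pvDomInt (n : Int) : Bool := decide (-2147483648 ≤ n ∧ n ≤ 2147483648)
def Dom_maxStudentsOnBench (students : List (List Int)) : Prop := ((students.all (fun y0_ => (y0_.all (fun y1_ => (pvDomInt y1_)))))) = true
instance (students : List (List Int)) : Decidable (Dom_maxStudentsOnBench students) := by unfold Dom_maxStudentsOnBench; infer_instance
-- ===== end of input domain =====

-- B replaces A's dict of per-bench student sets by a sort of the (bench, student) pairs followed by a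
-- single run-length scan that skips adjacent duplicate pairs (objective: alternative algorithm, no dict/set).

-- ===== PORT A =====
def maxStudentsOnBench (students : List (List Int)) : Int :=
  let benches : PySem.Dict Int (PySem.Set Int) :=
    students.foldl (fun benches row =>
      match row with
      | [student, bench] =>
          if benches.contains bench then
            benches.insert bench (PySem.Set.add (benches.getD bench PySem.Set.empty) student)
          else
            benches.insert bench (PySem.Set.ofList [student])
      | _ => benches) PySem.Dict.empty
  benches.values.foldl (fun ans s => max ans (s.length : Int)) 0

-- ===== PORT B =====
-- the body of Source B's for-loop over the sorted pairs (state = (best, run, prev))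
def pvStepB (st : Int × Int × Option (Int × Int)) (p : Int × Int) : Int × Int × Option (Int × Int) :=
  if some p = st.2.2 then st
  else
    let run' : Int := match st.2.2 with
      | some q => if p.1 = q.1 then st.2.1 + 1 else 1
      | none => 1
    (if run' > st.1 then run' else st.1, run', some p)

def maxStudentsOnBench_alt (students : List (List Int)) : Int :=
  let pairs : List (Int × Int) :=
    PySem.List.sorted2
      (students.filterMap (fun row =>
        match row with
        | [s, b] => some (b, s)
        | [] => none
        | [_] => none
        | _ :: _ :: _ :: _ => none))
      (·.1) (·.2) false
  (pairs.foldl pvStepB ((0 : Int), (0 : Int), (none : Option (Int × Int)))).1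

-- ===== PRECONDITION & SPEC =====
-- Pre_ excludes rows that are not 2-element lists: on those, Python A (and Python B) raise ValueError when unpacking the row.
def Pre_maxStudentsOnBench (students : List (List Int)) : Prop := ∀ r ∈ students, r.length = 2
instance (students : List (List Int)) : Decidable (Pre_maxStudentsOnBench students) := by unfold Pre_maxStudentsOnBench; infer_instance
def pvWitness_maxStudentsOnBench : List (List Int) := [[1, 2], [3, 2], [1, 2], [4, 5]]

def Spec_maxStudentsOnBench (students : List (List Int)) (out : Int) : Prop := out = maxStudentsOnBench_alt students
instance (students : List (List Int)) (out : Int) : Decidable (Spec_maxStudentsOnBench students out) := by unfold Spec_maxStudentsOnBench; infer_instance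

-- ===== CLAIM (what is proved, stated in full; the proofs are below) =====
def Claim_equal_maxStudentsOnBench : Prop := ∀ (students : List (List Int)), Dom_maxStudentsOnBench students → Pre_maxStudentsOnBench students → Spec_maxStudentsOnBench students (maxStudentsOnBench students)

-- ===== LEMMAS AND PROOFS =====

-- ---------- A-side characterisation (dict of per-bench sets) ----------

-- the (student, bench) pairs extracted from well-formed rows
def pvPairs (students : List (List Int)) : List (Int × Int) :=
  students.filterMap (fun row =>
    match row with
    | [s, b] => some (s, b)
    | [] => none
    | [_] => none
    | _ :: _ :: _ :: _ => none)

-- the value A's loop body stores under key p.2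
def pvVal (d : PySem.Dict Int (PySem.Set Int)) (p : Int × Int) : PySem.Set Int :=
  if d.contains p.2 then PySem.Set.add (d.getD p.2 PySem.Set.empty) p.1 else PySem.Set.ofList [p.1]

-- A's row loop is the pair loop in single-insert form
lemma pvA_fold_rows (l : List (List Int)) (d : PySem.Dict Int (PySem.Set Int)) :
    l.foldl (fun benches row =>
      match row with
      | [student, bench] =>
          if benches.contains bench then
            benches.insert bench (PySem.Set.add (benches.getD bench PySem.Set.empty) student)
          else
            benches.insert bench (PySem.Set.ofList [student])
      | _ => benches) d
    = (pvPairs l).foldl (fun d p => d.insert p.2 (pvVal d p)) d := by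
  induction l generalizing d with
  | nil => rfl
  | cons r t ih =>
    match r with
    | [] => simpa [pvPairs] using ih d
    | [s] => simpa [pvPairs] using ih d
    | s :: b :: c :: rest => simpa [pvPairs] using ih d
    | [s, b] =>
      simp only [List.foldl_cons, pvPairs, List.filterMap_cons]
      rw [ih]
      simp only [pvVal]
      congr 1
      split <;> rfl

-- getD characterisation of A's dict loop: per bench, the set of its students in first-occurrence order
lemma pvA_getD (l : List (Int × Int)) (d : PySem.Dict Int (PySem.Set Int)) (c : Int) :
    (l.foldl (fun d p => d.insert p.2 (pvVal d p)) d).getD c PySem.Set.empty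
    = PySem.Set.update (d.getD c PySem.Set.empty) ((l.filter (fun p => p.2 == c)).map Prod.fst) := by
  induction l generalizing d with
  | nil => rfl
  | cons p t ih =>
    simp only [List.foldl_cons, List.filter_cons, ih]
    by_cases h : p.2 = c
    · subst h
      simp only [beq_self_eq_true, if_pos, List.map_cons]
      rw [PySem.Set.update_cons]
      congr 1
      rw [PySem.Dict.getD_insert_self]
      unfold pvVal
      by_cases hc : d.contains p.2
      · rw [if_pos hc]
      · rw [if_neg (by simp [hc]), PySem.Dict.getD_of_not_contains (h := by simpa using hc)]
        rfl
    · have hb : (p.2 == c) = false := by simpa using h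
      simp only [hb, Bool.false_eq_true, if_neg, not_false_iff]
      congr 1
      rw [PySem.Dict.getD_insert_of_ne]
      exact fun hcp => h hcp.symm

-- first-occurrence dedup commutes with filter
lemma pvOfList_filter (p : Int × Int → Bool) (l : List (Int × Int)) :
    ∀ (s : List (Int × Int)),
    (l.foldl PySem.Set.add s).filter p = (l.filter p).foldl PySem.Set.add (s.filter p) := by
  induction l with
  | nil => intro s; rfl
  | cons x t ih =>
    intro s
    simp only [List.foldl_cons, List.filter_cons]
    rw [ih]
    by_cases hx : p x = true
    · simp only [hx, if_pos, List.foldl_cons]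
      congr 1
      rw [PySem.Set.add_eq_ite, PySem.Set.add_eq_ite]
      by_cases hm : x ∈ s
      · rw [if_pos hm, if_pos (by simp [List.mem_filter, hm, hx])]
      · rw [if_neg hm, if_neg (by simp [List.mem_filter, hm]), List.filter_append]
        simp [hx]
    · have hx' : p x = false := by simpa using hx
      simp only [hx', Bool.false_eq_true, if_neg, not_false_iff]
      congr 1
      rw [PySem.Set.add_eq_ite]
      by_cases hm : x ∈ s
      · rw [if_pos hm]
      · rw [if_neg hm, List.filter_append]
        simp [hx']

-- the swap map (s, b) ↦ (b, s)
def pvSwap (p : Int × Int) : Int × Int := (p.2, p.1)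

-- first-occurrence dedup commutes with the injective map pvSwap
lemma pvOfList_map_swap :
    ∀ (l : List (Int × Int)) (s : List (Int × Int)),
    (l.map pvSwap).foldl PySem.Set.add (s.map pvSwap) = (l.foldl PySem.Set.add s).map pvSwap := by
  intro l
  induction l with
  | nil => intro s; rfl
  | cons x t ih =>
    intro s
    simp only [List.map_cons, List.foldl_cons]
    have hadd : PySem.Set.add (s.map pvSwap) (pvSwap x) = (PySem.Set.add s x).map pvSwap := by
      rw [PySem.Set.add_eq_ite, PySem.Set.add_eq_ite]
      by_cases hm : x ∈ s
      · rw [if_pos hm, if_pos (List.mem_map_of_mem hm)]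
      · rw [if_neg hm, if_neg ?_, List.map_append]
        · rfl
        intro hc
        rcases List.mem_map.mp hc with ⟨q, hq, hfs⟩
        have : q = x := by
          have := congrArg Prod.fst hfs
          have := congrArg Prod.snd hfs
          unfold pvSwap at *
          exact Prod.ext (by simp_all) (by simp_all)
        exact hm (this ▸ hq)
    rw [hadd, ih]

-- on a list whose second components are all b, dedup commutes with Prod.fst
lemma pvOfList_map_fst (b : Int) :
    ∀ (l : List (Int × Int)) (s : List (Int × Int)), (∀ q ∈ l, q.2 = b) → (∀ q ∈ s, q.2 = b) →
    (l.map Prod.fst).foldl PySem.Set.add (s.map Prod.fst) = (l.foldl PySem.Set.add s).map Prod.fst := by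
  intro l
  induction l with
  | nil => intro s _ _; rfl
  | cons x t ih =>
    intro s hl hs
    simp only [List.map_cons, List.foldl_cons]
    have hadd : PySem.Set.add (s.map Prod.fst) x.1 = (PySem.Set.add s x).map Prod.fst := by
      rw [PySem.Set.add_eq_ite, PySem.Set.add_eq_ite]
      by_cases hm : x ∈ s
      · rw [if_pos hm, if_pos (List.mem_map_of_mem hm)]
      · rw [if_neg hm, if_neg ?_, List.map_append]
        · rfl
        intro hc
        rcases List.mem_map.mp hc with ⟨q, hq, hfst⟩
        apply hm
        have : q = x := by
          have h1 : q.2 = b := hs q hq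
          have h2 : x.2 = b := hl x List.mem_cons_self
          exact Prod.ext hfst (h1.trans h2.symm)
        rwa [this] at hq
    rw [hadd]
    exact ih (PySem.Set.add s x)
        (fun q hq => hl q (List.mem_cons_of_mem _ hq))
        (fun q hq => by
          rcases (PySem.Set.mem_add _ _ _).mp hq with h | h
          · exact hs q h
          · rw [h]; exact hl x List.mem_cons_self)

-- per-bench distinct-student count expressed over the dedupped pair list
lemma pvPointwise (ps : List (Int × Int)) (b : Int) :
    ((PySem.Set.ofList ((ps.filter (fun p => p.2 == b)).map Prod.fst)).length : Int)
    = (((PySem.Set.ofList ps).countP (fun p => p.2 == b) : Nat) : Int) := by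
  have hflt : ∀ q ∈ ps.filter (fun p => p.2 == b), q.2 = b := by
    intro q hq
    simpa using (List.of_mem_filter hq)
  have h2 : (PySem.Set.ofList ps).countP (fun p => p.2 == b)
      = ((PySem.Set.ofList ps).filter (fun p => p.2 == b)).length := by
    rw [List.countP_eq_length_filter]
  have h3 : (PySem.Set.ofList ps).filter (fun p => p.2 == b)
      = PySem.Set.ofList (ps.filter (fun p => p.2 == b)) := by
    rw [PySem.Set.ofList_eq_foldl, PySem.Set.ofList_eq_foldl, pvOfList_filter]
    rfl
  have h4 : PySem.Set.ofList ((ps.filter (fun p => p.2 == b)).map Prod.fst)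
      = (PySem.Set.ofList (ps.filter (fun p => p.2 == b))).map Prod.fst := by
    rw [PySem.Set.ofList_eq_foldl, PySem.Set.ofList_eq_foldl,
      ← pvOfList_map_fst b _ [] hflt (by intro q h; cases h)]
    rfl
  rw [h2, h3, h4, List.length_map]

-- ---------- B-side: sortedness of the sorted2 output ----------

def pvLexLE (a b : Int × Int) : Prop := a.1 < b.1 ∨ (a.1 = b.1 ∧ a.2 ≤ b.2)
def pvLexLT (a b : Int × Int) : Prop := a.1 < b.1 ∨ (a.1 = b.1 ∧ a.2 < b.2)

lemma pvLexLE_trans {a b c : Int × Int} (h1 : pvLexLE a b) (h2 : pvLexLE b c) : pvLexLE a c := by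
  unfold pvLexLE at *; rcases h1 with h | ⟨h, h'⟩ <;> rcases h2 with g | ⟨g, g'⟩ <;> omega

lemma pvLexLT_of_le_ne {a b : Int × Int} (h : pvLexLE a b) (hne : a ≠ b) : pvLexLT a b := by
  unfold pvLexLE pvLexLT at *
  rcases h with h | ⟨h, h'⟩
  · exact Or.inl h
  · refine Or.inr ⟨h, lt_of_le_of_ne h' ?_⟩
    intro hs; exact hne (Prod.ext h hs)

lemma pvLexLE_antisymm {a b : Int × Int} (h1 : pvLexLE a b) (h2 : pvLexLE b a) : a = b := by
  unfold pvLexLE at *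
  refine Prod.ext ?_ ?_ <;> omega

lemma pvLexLT_irrefl (a : Int × Int) : ¬ pvLexLT a a := by unfold pvLexLT; omega

-- insertBy with a lex test keeps the list pairwise-sorted
lemma pvInsertBy_pairwise (x : Int × Int) (l : List (Int × Int))
    (hl : l.Pairwise pvLexLE) :
    (PySem.List.insertBy (fun a b => decide (a.1 < b.1) || (!decide (b.1 < a.1) && decide (a.2 < b.2))) x l).Pairwise pvLexLE := by
  induction l with
  | nil => simp [PySem.List.insertBy]
  | cons y ys ih =>
    rcases List.pairwise_cons.mp hl with ⟨hy, hys⟩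
    show (if (decide (x.1 < y.1) || (!decide (y.1 < x.1) && decide (x.2 < y.2))) = true
        then x :: y :: ys
        else y :: PySem.List.insertBy _ x ys).Pairwise pvLexLE
    by_cases hb : (decide (x.1 < y.1) || (!decide (y.1 < x.1) && decide (x.2 < y.2))) = true
    · rw [if_pos hb]
      have hxy : pvLexLE x y := by
        simp only [Bool.or_eq_true, Bool.and_eq_true, Bool.not_eq_true', decide_eq_true_eq,
          decide_eq_false_iff_not] at hb
        unfold pvLexLE; omega
      refine List.pairwise_cons.mpr ⟨?_, hl⟩
      intro z hz
      rcases List.mem_cons.mp hz with rfl | hz'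
      · exact hxy
      · exact pvLexLE_trans hxy (hy z hz')
    · rw [if_neg hb]
      have hyx : pvLexLE y x := by
        simp only [Bool.or_eq_true, Bool.and_eq_true, Bool.not_eq_true', decide_eq_true_eq,
          decide_eq_false_iff_not] at hb
        unfold pvLexLE; omega
      refine List.pairwise_cons.mpr ⟨?_, ih hys⟩
      intro z hz
      rcases (PySem.List.mem_insertBy _ _ _ _).mp hz with rfl | hz'
      · exact hyx
      · exact hy z hz'

lemma pvFoldInsert_pairwise :
    ∀ (xs acc : List (Int × Int)), acc.Pairwise pvLexLE →
    (xs.foldl (fun acc x =>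
        PySem.List.insertBy (fun a b => decide (a.1 < b.1) || (!decide (b.1 < a.1) && decide (a.2 < b.2))) x acc) acc).Pairwise pvLexLE := by
  intro xs
  induction xs with
  | nil => intro acc h; exact h
  | cons x t ih =>
    intro acc h
    exact ih _ (pvInsertBy_pairwise x acc h)

lemma pvSorted2_pairwise (xs : List (Int × Int)) :
    (PySem.List.sorted2 xs (·.1) (·.2) false).Pairwise pvLexLE := by
  have := pvFoldInsert_pairwise xs [] List.Pairwise.nil
  simpa [PySem.List.sorted2] using this

-- ---------- B-side: the adjacent-duplicate filter ----------

def pvDD : Option (Int × Int) → List (Int × Int) → List (Int × Int)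
  | _, [] => []
  | prev, x :: xs => if some x = prev then pvDD prev xs else x :: pvDD (some x) xs

lemma pvDD_sublist (prev : Option (Int × Int)) (L : List (Int × Int)) :
    (pvDD prev L).Sublist L := by
  induction L generalizing prev with
  | nil => exact List.Sublist.refl _
  | cons x xs ih =>
    unfold pvDD
    split
    · exact (ih prev).cons x
    · exact (ih (some x)).cons₂ x

lemma pvMem_of_mem_dd {prev : Option (Int × Int)} {L : List (Int × Int)} {x : Int × Int}
    (h : x ∈ pvDD prev L) : x ∈ L := (pvDD_sublist prev L).mem h

lemma pvMem_dd_of_mem {L : List (Int × Int)} {x : Int × Int} (prev : Option (Int × Int))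
    (h : x ∈ L) : x ∈ pvDD prev L ∨ some x = prev := by
  induction L generalizing prev with
  | nil => cases h
  | cons y ys ih =>
    unfold pvDD
    split
    · rcases List.mem_cons.mp h with rfl | h'
      · right; assumption
      · exact ih prev h'
    · rcases List.mem_cons.mp h with rfl | h'
      · left; exact List.mem_cons_self
      · rcases ih (some y) h' with hm | he
        · left; exact List.mem_cons_of_mem _ hm
        · left; rw [Option.some_inj] at he; rw [he]; exact List.mem_cons_self

-- the fold over L equals the fold over the dedupped list (the skip branch)
lemma pvFold_dd (L : List (Int × Int)) (st : Int × Int × Option (Int × Int)) :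
    L.foldl pvStepB st = (pvDD st.2.2 L).foldl pvStepB st := by
  induction L generalizing st with
  | nil => rfl
  | cons x xs ih =>
    rw [List.foldl_cons]
    unfold pvDD
    by_cases h : some x = st.2.2
    · rw [if_pos h]
      have hskip : pvStepB st x = st := by unfold pvStepB; rw [if_pos h]
      rw [hskip]
      exact ih st
    · rw [if_neg h, List.foldl_cons]
      have hprev : (pvStepB st x).2.2 = some x := by
        unfold pvStepB; rw [if_neg h]
      rw [ih (pvStepB st x), hprev]

-- dedup of a lex-sorted list is strictly sorted
lemma pvDD_nodup :
    ∀ (L : List (Int × Int)) (prev : Option (Int × Int)), L.Pairwise pvLexLE →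
    (∀ x ∈ L, ∀ q, prev = some q → pvLexLE q x) →
    (pvDD prev L).Nodup ∧ (∀ q, prev = some q → q ∉ pvDD prev L) := by
  intro L
  induction L with
  | nil =>
    intro prev _ _
    exact ⟨List.nodup_nil, fun q _ h => by cases h⟩
  | cons x xs ih =>
    intro prev hp hprev
    rcases List.pairwise_cons.mp hp with ⟨hx, hxs⟩
    unfold pvDD
    by_cases h : some x = prev
    · rw [if_pos h]
      exact ih prev hxs (fun y hy q hq => hprev y (List.mem_cons_of_mem _ hy) q hq)
    · rw [if_neg h]
      have ihx := ih (some x) hxs (fun y hy q hq => by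
        rw [Option.some_inj] at hq; rw [← hq]; exact hx y hy)
      refine ⟨List.nodup_cons.mpr ⟨ihx.2 x rfl, ihx.1⟩, ?_⟩
      intro q hq hmem
      rcases List.mem_cons.mp hmem with rfl | hm
      · exact h hq.symm
      · have hqxs : q ∈ xs := pvMem_of_mem_dd hm
        have h1 : pvLexLE x q := hx q hqxs
        have h2 : pvLexLE q x := hprev x List.mem_cons_self q hq
        have : q = x := pvLexLE_antisymm h2 h1
        rw [this] at hq
        exact h hq.symm

lemma pvDD_pairwise_lt (L : List (Int × Int)) (hL : L.Pairwise pvLexLE) :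
    (pvDD none L).Pairwise pvLexLT := by
  have hle : (pvDD none L).Pairwise pvLexLE := hL.sublist (pvDD_sublist none L)
  have hnd : (pvDD none L).Nodup :=
    (pvDD_nodup L none hL (fun _ _ q hq => by cases hq)).1
  exact (hle.and hnd).imp (fun h => pvLexLT_of_le_ne h.1 h.2)

-- ---------- B-side: the run-length scan ----------

def pvCnt (b : Int) (E : List (Int × Int)) : Int := (E.countP (fun p => p.1 == b) : Int)

def pvSUP (f : Int → Int) (E : List (Int × Int)) : Int :=
  E.foldr (fun p acc => max (f p.1) acc) 0

lemma pvSUP_nonneg (f : Int → Int) (E : List (Int × Int)) : 0 ≤ pvSUP f E := by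
  induction E with
  | nil => exact le_refl 0
  | cons p E ih => exact le_trans ih (le_max_right _ _)

lemma pvSUP_ge (f : Int → Int) {E : List (Int × Int)} {p : Int × Int} (h : p ∈ E) :
    f p.1 ≤ pvSUP f E := by
  induction E with
  | nil => cases h
  | cons x E ih =>
    rcases List.mem_cons.mp h with rfl | h'
    · exact le_max_left _ _
    · exact le_trans (ih h') (le_max_right _ _)

lemma pvSUP_le (f : Int → Int) (E : List (Int × Int)) (c : Int) (h0 : 0 ≤ c)
    (h : ∀ p ∈ E, f p.1 ≤ c) : pvSUP f E ≤ c := by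
  induction E with
  | nil => exact h0
  | cons p E ih =>
    exact max_le (h p List.mem_cons_self) (ih (fun q hq => h q (List.mem_cons_of_mem _ hq)))

lemma pvSUP_congr {f g : Int → Int} (E : List (Int × Int)) (h : ∀ p ∈ E, f p.1 = g p.1) :
    pvSUP f E = pvSUP g E := by
  induction E with
  | nil => rfl
  | cons p E ih =>
    unfold pvSUP
    simp only [List.foldr_cons]
    rw [h p List.mem_cons_self]
    congr 1
    exact ih (fun q hq => h q (List.mem_cons_of_mem _ hq))

lemma pvSUP_cons (f : Int → Int) (p : Int × Int) (E : List (Int × Int)) :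
    pvSUP f (p :: E) = max (f p.1) (pvSUP f E) := rfl

lemma pvCnt_nonneg (b : Int) (E : List (Int × Int)) : 0 ≤ pvCnt b E := Int.natCast_nonneg _

lemma pvCnt_cons (b : Int) (p : Int × Int) (E : List (Int × Int)) :
    pvCnt b (p :: E) = pvCnt b E + (if p.1 = b then 1 else 0) := by
  by_cases h : p.1 = b <;> simp [pvCnt, h]

lemma pvIfMax (b r : Int) : (if r > b then r else b) = max b r := by
  rw [max_def]; split_ifs <;> omega

-- max absorption: max c S = max r S when r ≤ c and (c = r or c ≤ S)
lemma pvMax_absorb {S c r : Int} (h1 : r ≤ c) (h2 : c = r ∨ c ≤ S) : max c S = max r S := by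
  rcases h2 with h | h
  · rw [h]
  · rw [max_eq_right h, max_eq_right (le_trans h1 h)]

-- the head term of the per-bench sup may be replaced by the bare run extension
lemma pvMaxHead {c : Int} (g : Int → Int) (E : List (Int × Int)) (r b0 : Int)
    (hgb : g b0 = c) (hc : c = pvCnt b0 E + r) : max c (pvSUP g E) = max r (pvSUP g E) := by
  apply pvMax_absorb
  · have := pvCnt_nonneg b0 E; omega
  · by_cases hpos : 0 < E.countP (fun p => p.1 == b0)
    · right
      obtain ⟨z, hz, hzb⟩ := List.countP_pos_iff.mp hpos
      have hz1 : z.1 = b0 := by simpa using hzb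
      calc c = g z.1 := by rw [hz1, hgb]
        _ ≤ pvSUP g E := pvSUP_ge g hz
    · left
      have h0 : E.countP (fun p => p.1 == b0) = 0 := by omega
      rw [hc]
      unfold pvCnt
      rw [h0]
      simp

-- the scan on a strictly lex-sorted suffix computes the per-bench counts, extended by the open run
lemma pvScan :
    ∀ (E : List (Int × Int)) (best run : Int) (q : Int × Int),
    E.Pairwise pvLexLT → (∀ p ∈ E, pvLexLT q p) → 0 ≤ run → run ≤ best →
    (E.foldl pvStepB (best, run, some q)).1
      = max best (pvSUP (fun b => pvCnt b E + if b = q.1 then run else 0) E) := by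
  intro E
  induction E with
  | nil =>
    intro best run q _ _ h0 hrb
    show best = max best (pvSUP _ [])
    rw [show pvSUP (fun b => pvCnt b ([] : List (Int × Int)) + if b = q.1 then run else 0) [] = 0 from rfl,
      max_eq_left (by omega)]
  | cons p E ih =>
    intro best run q hpw hq h0 hrb
    rcases List.pairwise_cons.mp hpw with ⟨hp, hE⟩
    have hqp : pvLexLT q p := hq p List.mem_cons_self
    have hpq : ¬ (some p = some q) := by
      intro h
      rw [Option.some_inj] at h
      rw [h] at hqp
      exact pvLexLT_irrefl q hqp
    rw [List.foldl_cons]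
    have hstep : pvStepB (best, run, some q) p
        = (max best (if p.1 = q.1 then run + 1 else 1), (if p.1 = q.1 then run + 1 else 1), some p) := by
      simp only [pvStepB, if_neg hpq]
      rw [pvIfMax]
    rw [hstep]
    by_cases hb : p.1 = q.1
    · rw [if_pos hb,
        ih (max best (run + 1)) (run + 1) p hE hp (by omega) (le_max_right _ _)]
      have hgg : (fun b => pvCnt b (p :: E) + if b = q.1 then run else 0)
          = (fun b => pvCnt b E + if b = p.1 then run + 1 else 0) := by
        funext b
        rw [pvCnt_cons, ← hb]
        split_ifs <;> omega
      rw [hgg, pvSUP_cons,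
        pvMaxHead (fun b => pvCnt b E + if b = p.1 then run + 1 else 0) E (run + 1) p.1 rfl (by simp),
        ← max_assoc]
    · rw [if_neg hb,
        ih (max best 1) 1 p hE hp (by omega) (le_max_right _ _)]
      have hq1 : q.1 < p.1 := by
        unfold pvLexLT at hqp
        omega
      have hzq : ∀ z ∈ E, z.1 ≠ q.1 := by
        intro z hz
        have := hp z hz
        unfold pvLexLT at this
        omega
      have hgg : pvSUP (fun b => pvCnt b (p :: E) + if b = q.1 then run else 0) E
          = pvSUP (fun b => pvCnt b E + if b = p.1 then 1 else 0) E := by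
        apply pvSUP_congr
        intro z hz
        rw [pvCnt_cons]
        have := hzq z hz
        split_ifs <;> omega
      rw [pvSUP_cons, hgg]
      have hhead : pvCnt p.1 (p :: E) + (if p.1 = q.1 then run else 0)
          = pvCnt p.1 E + 1 := by
        rw [pvCnt_cons]
        split_ifs <;> omega
      rw [hhead,
        pvMaxHead (fun b => pvCnt b E + if b = p.1 then 1 else 0) E 1 p.1 (by simp) rfl,
        ← max_assoc]

-- ---------- assembly ----------

-- B's row projection is the swapped pair list
lemma pvQs_eq (students : List (List Int)) :
    students.filterMap (fun row =>
      match row with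
      | [s, b] => some (b, s)
      | [] => none
      | [_] => none
      | _ :: _ :: _ :: _ => none)
    = (pvPairs students).map pvSwap := by
  unfold pvPairs
  rw [List.map_filterMap]
  congr 1
  funext row
  match row with
  | [] => rfl
  | [s] => rfl
  | [s, b] => rfl
  | s :: b :: c :: rest => rfl

-- upper bound for A's running-max loop
lemma pvFoldMax_le (xs : List Int) (f : Int → Int) :
    ∀ (init c : Int), init ≤ c → (∀ x ∈ xs, f x ≤ c) →
    xs.foldl (fun a b => max a (f b)) init ≤ c := by
  induction xs with
  | nil => intro init c h0 _; exact h0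
  | cons x t ih =>
    intro init c h0 h
    exact ih _ c (max_le h0 (h x List.mem_cons_self)) (fun y hy => h y (List.mem_cons_of_mem _ hy))

set_option maxHeartbeats 1600000 in
lemma pvMain (students : List (List Int)) :
    maxStudentsOnBench students = maxStudentsOnBench_alt students := by
  simp only [maxStudentsOnBench, maxStudentsOnBench_alt]
  rw [pvA_fold_rows, pvQs_eq]
  set ps := pvPairs students with hps
  have hD :
      ((ps.foldl (fun d p => d.insert p.2 (pvVal d p)) PySem.Dict.empty).values)
      = (PySem.Set.ofList (ps.map Prod.snd)).map
          (fun b => PySem.Set.ofList ((ps.filter (fun p => p.2 == b)).map Prod.fst)) := by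
    rw [PySem.Dict.values_eq_map_keys _
        (PySem.Dict.nodup_keys_foldl_insert_key ps Prod.snd pvVal PySem.Dict.empty PySem.Dict.nodup_keys_empty)
        PySem.Set.empty]
    rw [PySem.Dict.keys_foldl_insert_key, PySem.Dict.keys_empty, PySem.Set.update_nil_left]
    apply List.map_congr_left
    intro b _
    rw [pvA_getD, PySem.Dict.getD_empty,
      show (PySem.Set.empty : PySem.Set Int) = [] from rfl, PySem.Set.update_nil_left]
  rw [hD, List.foldl_map]
  set L := PySem.List.sorted2 (ps.map pvSwap) (fun p => p.1) (fun p => p.2) false with hLdef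
  have hLpw : L.Pairwise pvLexLE := pvSorted2_pairwise _
  have hdd := pvFold_dd L ((0 : Int), (0 : Int), (none : Option (Int × Int)))
  rw [hdd]
  set E := pvDD none L with hEdef
  have hEpw : E.Pairwise pvLexLT := pvDD_pairwise_lt L hLpw
  have hEnodup : E.Nodup := (pvDD_nodup L none hLpw (fun _ _ q hq => by cases hq)).1
  have hperm : E.Perm (PySem.Set.ofList (ps.map pvSwap)) := by
    rw [List.perm_ext_iff_of_nodup hEnodup (PySem.Set.nodup_ofList _)]
    intro a
    rw [PySem.Set.mem_ofList]
    constructor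
    · intro h
      exact ((PySem.List.sorted2_perm _ _ _ _).mem_iff).mp (pvMem_of_mem_dd h)
    · intro h
      have hLmem : a ∈ L := ((PySem.List.sorted2_perm _ _ _ _).mem_iff).mpr h
      rcases pvMem_dd_of_mem none hLmem with hm | he
      · exact hm
      · cases he
  have hofmap : PySem.Set.ofList (ps.map pvSwap) = (PySem.Set.ofList ps).map pvSwap := by
    rw [PySem.Set.ofList_eq_foldl, PySem.Set.ofList_eq_foldl, ← pvOfList_map_swap ps []]
    rfl
  have hCnt : ∀ b : Int, pvCnt b E
      = ((PySem.Set.ofList ((ps.filter (fun p => p.2 == b)).map Prod.fst)).length : Int) := by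
    intro b
    unfold pvCnt
    rw [hperm.countP_eq, hofmap, List.countP_map]
    have hcomp : ((fun (p : Int × Int) => p.1 == b) ∘ pvSwap) = (fun (p : Int × Int) => p.2 == b) := by
      funext p; rfl
    rw [hcomp]
    exact (pvPointwise ps b).symm
  have hbm : ∀ b : Int, b ∈ PySem.Set.ofList (ps.map Prod.snd) ↔ ∃ p ∈ E, p.1 = b := by
    intro b
    rw [PySem.Set.mem_ofList, List.mem_map]
    constructor
    · rintro ⟨r, hr, rfl⟩
      have hmem : pvSwap r ∈ PySem.Set.ofList (ps.map pvSwap) :=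
        (PySem.Set.mem_ofList _ _).mpr (List.mem_map_of_mem hr)
      exact ⟨pvSwap r, hperm.mem_iff.mpr hmem, rfl⟩
    · rintro ⟨p, hpE, rfl⟩
      have hmem : p ∈ ps.map pvSwap :=
        (PySem.Set.mem_ofList _ _).mp (hperm.mem_iff.mp hpE)
      rcases List.mem_map.mp hmem with ⟨r, hr, rfl⟩
      exact ⟨r, hr, rfl⟩
  rcases hEE : E with _ | ⟨e, E'⟩
  · -- empty pair list: both sides are 0
    have hLnil : L = [] := by
      cases hLL : L with
      | nil => rfl
      | cons x xs =>
        rw [hEdef, hLL] at hEE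
        unfold pvDD at hEE
        rw [if_neg (by simp)] at hEE
        cases hEE
    have hqs : ps.map pvSwap = [] := by
      have := PySem.List.sorted2_perm (ps.map pvSwap) (fun (p : Int × Int) => p.1) (fun p => p.2) false
      rw [← hLdef, hLnil] at this
      exact this.symm.eq_nil
    have hpsnil : ps = [] := List.map_eq_nil_iff.mp hqs
    rw [hpsnil]
    rfl
  · -- nonempty: the scan computes the per-bench sup
    rw [List.foldl_cons,
      show pvStepB ((0 : Int), (0 : Int), (none : Option (Int × Int))) e = (1, 1, some e) from rfl]
    rw [hEE] at hEpw
    rcases List.pairwise_cons.mp hEpw with ⟨hhead, htail⟩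
    rw [pvScan E' 1 1 e htail hhead (by omega) (le_refl 1)]
    have hg' : (fun b => pvCnt b E' + if b = e.1 then 1 else 0) = fun b => pvCnt b (e :: E') := by
      funext b
      rw [pvCnt_cons]
      split_ifs <;> omega
    rw [hg']
    have hBsup : max 1 (pvSUP (fun b => pvCnt b (e :: E')) E')
        = pvSUP (fun b => pvCnt b (e :: E')) (e :: E') := by
      rw [pvSUP_cons]
      exact (pvMaxHead (c := pvCnt e.1 (e :: E')) (fun b => pvCnt b (e :: E')) E' 1 e.1 rfl
        (by rw [pvCnt_cons]; simp)).symm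
    rw [hBsup, ← hEE]
    apply le_antisymm
    · apply pvFoldMax_le
      · exact pvSUP_nonneg _ _
      · intro b hb
        rcases (hbm b).mp hb with ⟨p, hpE, rfl⟩
        rw [← hCnt p.1]
        exact pvSUP_ge _ hpE
    · apply pvSUP_le
      · exact (PySem.List.le_foldl_max_int (PySem.Set.ofList (ps.map Prod.snd))
          (fun b => ((PySem.Set.ofList ((ps.filter (fun p => p.2 == b)).map Prod.fst)).length : Int)) 0).1
      · intro p hpE
        have hb : p.1 ∈ PySem.Set.ofList (ps.map Prod.snd) := (hbm p.1).mpr ⟨p, hpE, rfl⟩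
        rw [hCnt p.1]
        exact (PySem.List.le_foldl_max_int _ _ 0).2 _ hb

-- ===== VERDICT (by name: the statement is the Claim_ definition above) =====
theorem maxStudentsOnBench_spec : Claim_equal_maxStudentsOnBench := by
  intro students _ _
  exact pvMain students
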